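-- pv_equiv track=rewrite | github.com/georgegburns/Daily-Coding-Problem | Dropbox - Numerical_Coding-Alphabet - Easy.py | alphabetDecoder
-- ===== SOURCE A (Python) =====
-- from string import ascii_uppercase as alp
--
-- def alphabetDecoder(string : str):
--     #dictionary of alphabet : numerical number using string.ascii
--     alphabet = {}
--     for i, char in enumerate(alp):
--         alphabet[char] = i + 1
--     result = 0
--     #to ensure input is in uppercase
--     string = string.upper()
--     length = len(string)-1
--
--     # ea cycle of letters results in the numerical value of the letter times 26 to the power of the length-1
--     # i.e. A is 1 (1 * 26 ** 1-1 (0) = 1),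
--     # AA is 27, 1 (from the previous calc) + (1 * 26 ** 2-1 (1) /LEN(AA)=2)/ = 26), etc...
--     for letter in string:
--         result += alphabet[letter] * 26 ** length
--         length -= 1
--     return result
-- ===== SOURCE B (Python) =====
-- from string import ascii_uppercase as alp
--
-- def alphabetDecoder(string : str):
--     # same lookup table, so invalid characters still raise KeyError
--     alphabet = {char: i + 1 for i, char in enumerate(alp)}
--     # recursion from the front: go(s) = (value of s, 26**len(s)),
--     # building place values bottom-up from the right instead of
--     # exponentiating per position
--     def go(s):
--         if not s:
--             return (0, 1)
--         total, place = go(s[1:])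
--         return (total + alphabet[s[0]] * place, place * 26)
--     return go(string.upper())[0]
-- ===== Notes on version B (the rewrite author's own statement) =====
-- stated objective: alternative
-- what changed: Replaces A's iterative loop with per-letter 26**position exponentiation and a decreasing length counter by a head recursion that returns a (value, place) pair, building each place value by one multiplication from the right.
import Mathlib
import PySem

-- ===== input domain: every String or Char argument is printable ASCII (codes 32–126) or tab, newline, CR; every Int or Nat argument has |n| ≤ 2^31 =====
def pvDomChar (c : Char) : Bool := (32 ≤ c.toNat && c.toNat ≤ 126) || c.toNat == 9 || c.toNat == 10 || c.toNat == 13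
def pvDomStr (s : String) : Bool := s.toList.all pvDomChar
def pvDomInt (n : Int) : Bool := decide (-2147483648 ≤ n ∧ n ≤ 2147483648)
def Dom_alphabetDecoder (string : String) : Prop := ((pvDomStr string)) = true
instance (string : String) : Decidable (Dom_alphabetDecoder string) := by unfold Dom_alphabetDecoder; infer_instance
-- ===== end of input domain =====

-- B replaces A's per-letter 26**position loop by a head recursion returning a (value, place) pair built from the right.


-- ===== PORT A =====
-- string.ascii_uppercase
def pvAlp : List Char := ['A','B','C','D','E','F','G','H','I','J','K','L','M',
                          'N','O','P','Q','R','S','T','U','V','W','X','Y','Z']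

-- the dict built by 'for i, char in enumerate(alp): alphabet[char] = i + 1'
def pvAlphabet : PySem.Dict Char Int :=
  (PySem.List.enumerate pvAlp).foldl (fun d p => d.insert p.2 (p.1 + 1)) PySem.Dict.empty

def alphabetDecoder (string : String) : Int :=
  -- alphabet = pvAlphabet (built above)
  -- string = string.upper()
  let s := PySem.Chars.upper string.toList
  -- length = len(string) - 1
  -- loop: result += alphabet[letter] * 26 ** length; length -= 1
  -- alphabet[letter] is ported as getD … 0: Python raises KeyError there, excluded by Pre_;
  -- the exponent is nonnegative on every iteration, so ².toNat is exact.
  (s.foldl (fun p letter => (p.1 + pvAlphabet.getD letter 0 * 26 ^ p.2.toNat, p.2 - 1))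
    ((0 : Int), ((s.length : Int) - 1))).1

-- ===== PORT B =====
-- the inner recursive helper 'go' of Source B: go(s) = (value of s, 26**len(s))
def pvGo : List Char → Int × Int
  | [] => (0, 1)
  | c :: rest =>
      let p := pvGo rest
      (p.1 + pvAlphabet.getD c 0 * p.2, p.2 * 26)

def alphabetDecoder_alt (string : String) : Int :=
  (pvGo (PySem.Chars.upper string.toList)).1

-- ===== PRECONDITION & SPEC =====
-- Pre_ excludes exactly the strings containing a non-letter character, on which both Pythons raise KeyError.
def Pre_alphabetDecoder (string : String) : Prop :=
  string.toList.all (fun c => ('A' ≤ c && c ≤ 'Z') || ('a' ≤ c && c ≤ 'z')) = true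
instance (string : String) : Decidable (Pre_alphabetDecoder string) := by
  unfold Pre_alphabetDecoder; infer_instance
def pvWitness_alphabetDecoder : String := "aZ"

def Spec_alphabetDecoder (string : String) (out : Int) : Prop := out = alphabetDecoder_alt string
instance (string : String) (out : Int) : Decidable (Spec_alphabetDecoder string out) := by unfold Spec_alphabetDecoder; infer_instance

-- ===== CLAIM =====
def Claim_equal_alphabetDecoder : Prop := ∀ (string : String), Dom_alphabetDecoder string → Pre_alphabetDecoder string → Spec_alphabetDecoder string (alphabetDecoder string)

-- ===== LEMMAS AND PROOFS =====

-- B's place component is 26^length.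
theorem pvGo_snd (t : List Char) : (pvGo t).2 = 26 ^ t.length := by
  induction t with
  | nil => simp [pvGo]
  | cons c u ih => simp [pvGo, ih, pow_succ, mul_comm]

-- A's positional loop from any seeded accumulator equals the seed plus B's recursive value.
theorem pv_fold_go (t : List Char) : ∀ (b : Int),
    (t.foldl (fun p letter => (p.1 + pvAlphabet.getD letter 0 * 26 ^ p.2.toNat, p.2 - 1))
      (b, ((t.length : Int) - 1))).1
    = b + (pvGo t).1 := by
  induction t with
  | nil => intro b; simp [pvGo]
  | cons c u ih =>
    intro b
    have h1 : ((((c :: u).length : Int) - 1)).toNat = u.length := by simp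
    have h2 : (((c :: u).length : Int) - 1) - 1 = (u.length : Int) - 1 := by simp
    simp only [List.foldl_cons, h1, h2]
    rw [ih (b + pvAlphabet.getD c 0 * 26 ^ u.length)]
    simp [pvGo, pvGo_snd]
    ring

-- ===== VERDICT =====
theorem alphabetDecoder_spec : Claim_equal_alphabetDecoder := by
  intro s _ _
  unfold Spec_alphabetDecoder alphabetDecoder alphabetDecoder_alt
  simpa using pv_fold_go (PySem.Chars.upper s.toList) 0
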